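-- pv_equiv track=rewrite | github.com/Zlatky1991/Python_Fundamentals | functions_exercise/palindrome_integer.py | palindrome_integer
-- ===== SOURCE A (Python) =====
-- def palindrome_integer(numbers):
--     palindrome = []
--     for numbers in numbers:
--         if numbers[::-1] == numbers:
--             numbers = "True"
--             palindrome.append(numbers)
--         else:
--             numbers = "False"
--             palindrome.append(numbers)
--
--     return palindrome
-- ===== SOURCE B (Python) =====
-- def palindrome_integer(numbers):
--     palindrome = []
--     for s in numbers:
--         i = 0
--         j = len(s) - 1
--         is_pal = True
--         while i < j:
--             if s[i] != s[j]:
--                 is_pal = False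
--                 break
--             i += 1
--             j -= 1
--         palindrome.append("True" if is_pal else "False")
--     return palindrome
-- ===== Notes on version B (the rewrite author's own statement) =====
-- stated objective: alternative
-- what changed: Per string, replaces building the reversed string and comparing it whole with an in-place two-pointer paired scan that stops at the first mismatch (and at the middle), so no reversed copy is ever constructed.
import Mathlib
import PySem

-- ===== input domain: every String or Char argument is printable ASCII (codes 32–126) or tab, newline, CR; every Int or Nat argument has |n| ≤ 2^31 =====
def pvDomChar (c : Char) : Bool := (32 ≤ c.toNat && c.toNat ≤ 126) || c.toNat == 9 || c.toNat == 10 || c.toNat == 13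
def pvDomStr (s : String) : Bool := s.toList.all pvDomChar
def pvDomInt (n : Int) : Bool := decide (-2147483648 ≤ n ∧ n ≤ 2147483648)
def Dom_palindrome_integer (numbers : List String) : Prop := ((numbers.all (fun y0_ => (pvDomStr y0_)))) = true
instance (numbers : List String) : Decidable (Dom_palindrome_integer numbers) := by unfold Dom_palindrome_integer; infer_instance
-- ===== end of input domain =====

-- B replaces the slice-reversal comparison with a two-pointer paired scan with early exit; return value only.

-- ===== PORT A =====
-- for s in numbers: append "True" if s[::-1] == s else "False"
def palindrome_integer (numbers : List String) : List String :=
  numbers.foldl (fun palindrome s =>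
    if PySem.Str.slice? s none none (-1) = some s then palindrome ++ ["True"]
    else palindrome ++ ["False"]) []

-- ===== PORT B =====
-- the while i < j loop of Source B: compare s[i] with s[j], stop on mismatch
def pvTwoPtr (cs : List Char) (i j : Nat) : Bool :=
  if i < j then
    if cs.getD i ' ' ≠ cs.getD j ' ' then false
    else pvTwoPtr cs (i + 1) (j - 1)
  else true
termination_by j - i

def palindrome_integer_alt (numbers : List String) : List String :=
  numbers.foldl (fun palindrome s =>
    palindrome ++ [if pvTwoPtr s.toList 0 (s.toList.length - 1) then "True" else "False"]) []

-- ===== PRECONDITION & SPEC =====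
def Spec_palindrome_integer (numbers : List String) (out : List String) : Prop := out = palindrome_integer_alt numbers
instance (numbers : List String) (out : List String) : Decidable (Spec_palindrome_integer numbers out) := by unfold Spec_palindrome_integer; infer_instance

-- ===== CLAIM (what is proved, stated in full; the proofs are below) =====
def Claim_equal_palindrome_integer : Prop := ∀ (numbers : List String), Dom_palindrome_integer numbers → Spec_palindrome_integer numbers (palindrome_integer numbers)

-- ===== LEMMAS AND PROOFS =====

theorem pvTwoPtr_iff (cs : List Char) (i j : Nat) :
    pvTwoPtr cs i j = true ↔
      ∀ k, i ≤ k → k ≤ j → cs.getD k ' ' = cs.getD (i + j - k) ' ' := by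
  induction i, j using pvTwoPtr.induct cs with
  | case1 i j hij hne =>
    rw [pvTwoPtr, if_pos hij, if_pos hne]
    constructor
    · intro h; cases h
    · intro h
      exact ((hne (by simpa using h i le_rfl (le_of_lt hij)))).elim
  | case2 i j hij hne ih =>
    rw [pvTwoPtr, if_pos hij, if_neg hne]
    rw [ih]
    push Not at hne
    constructor
    · intro h k hik hkj
      rcases eq_or_lt_of_le hik with rfl | hik'
      · simpa using hne
      rcases eq_or_lt_of_le hkj with rfl | hkj'
      · have : i + k - k = i := by omega
        rw [this]; exact hne.symm
      · have := h k (by omega) (by omega)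
        have heq : (i + 1) + (j - 1) - k = i + j - k := by omega
        rwa [heq] at this
    · intro h k hik hkj
      have := h k (by omega) (by omega)
      have heq : i + j - k = (i + 1) + (j - 1) - k := by omega
      rwa [← heq]
  | case3 i j hij =>
    rw [pvTwoPtr, if_neg hij]
    simp only [true_iff]
    intro k hik hkj
    have : k = i ∧ k = j := by omega
    obtain ⟨rfl, rfl⟩ := this
    congr 1; omega

theorem pvTwoPtr_eq_reverse (cs : List Char) :
    pvTwoPtr cs 0 (cs.length - 1) = true ↔ cs.reverse = cs := by
  rw [pvTwoPtr_iff]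
  constructor
  · intro h
    apply List.ext_getElem (by simp)
    intro k h1 h2
    have hk : k < cs.length := h2
    rw [List.getElem_reverse]
    have := h (cs.length - 1 - k) (by omega) (by omega)
    have heq : 0 + (cs.length - 1) - (cs.length - 1 - k) = k := by omega
    rw [heq] at this
    rw [List.getD_eq_getElem cs ' ' (by omega), List.getD_eq_getElem cs ' ' hk] at this
    exact this
  · intro h k h0 hk
    rcases Nat.eq_zero_or_pos cs.length with hlen | hlen
    · have hnil : cs = [] := List.eq_nil_of_length_eq_zero hlen
      subst hnil; rfl
    have hk' : k < cs.length := by omega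
    unfold List.getD
    have h1 : cs[k]? = cs.reverse[k]? := by rw [h]
    rw [h1, List.getElem?_reverse hk']
    congr 2; omega

theorem per_string (s : String) :
    (if PySem.Str.slice? s none none (-1) = some s then ["True"] else ["False"]) =
      [if pvTwoPtr s.toList 0 (s.toList.length - 1) then "True" else "False"] := by
  rw [PySem.Str.slice?_none_none_neg_one]
  have h1 : String.ofList s.toList.reverse = s ↔ s.toList.reverse = s.toList := by
    constructor
    · intro h
      conv_rhs => rw [← h]
      simp
    · intro h
      rw [h]; simp
  by_cases hp : s.toList.reverse = s.toList
  · rw [if_pos (Option.some_inj.mpr (h1.mpr hp)),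
      if_pos ((pvTwoPtr_eq_reverse _).mpr hp)]
  · rw [if_neg (fun hc => hp (h1.mp (Option.some_inj.mp hc))),
      if_neg (fun hc => hp ((pvTwoPtr_eq_reverse _).mp hc))]

theorem foldl_eq (numbers : List String) (acc : List String) :
    numbers.foldl (fun palindrome s =>
      if PySem.Str.slice? s none none (-1) = some s then palindrome ++ ["True"]
      else palindrome ++ ["False"]) acc =
    numbers.foldl (fun palindrome s =>
      palindrome ++ [if pvTwoPtr s.toList 0 (s.toList.length - 1) then "True" else "False"]) acc := by
  induction numbers generalizing acc with
  | nil => rfl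
  | cons s rest ih =>
    simp only [List.foldl_cons]
    rw [← ih]
    congr 1
    by_cases h : PySem.Str.slice? s none none (-1) = some s
    · rw [if_pos h, ← per_string s, if_pos h]
    · rw [if_neg h, ← per_string s, if_neg h]

-- ===== VERDICT (by name: the statement is the Claim_ definition above) =====
theorem palindrome_integer_spec : Claim_equal_palindrome_integer := by
  intro numbers _
  unfold Spec_palindrome_integer palindrome_integer palindrome_integer_alt
  exact foldl_eq numbers []
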